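-- pv_equiv track=rewrite | github.com/livin-joseph/Scientific-Computing-Lab | PS1/Q2_REF_or_RREF.py | REFcheck2
-- ===== SOURCE A (Python) =====
-- def REFcheck2(mat):
--     # All zero rows should be at the bottom of the matrix
--     zeroRowFound = False
--     for i in mat:
--         if zeroRowFound == False:
--             flag = True
--             for j in i:
--                 if j != 0:
--                     flag = False
--                     break
--             if flag == True:
--                 # First zero row found
--                 zeroRowFound = True
--         else:
--             for j in i:
--                 if j != 0:
--                     return False
--     return True
-- ===== SOURCE B (Python) =====
-- def REFcheck2(mat):
--     # Two-phase: per-row zero table, then "zero rows at bottom" iff the table is already sorted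
--     zeros = [all(x == 0 for x in row) for row in mat]
--     return zeros == sorted(zeros)
-- ===== Notes on version B (the rewrite author's own statement) =====
-- stated objective: simpler
-- what changed: Replaced A's stateful short-circuiting scan (zeroRowFound flag plus inner break/early return) by a two-phase decomposition: build a per-row all-zero boolean table, then test that the table equals its sorted form (False rows before True rows).
import Mathlib
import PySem

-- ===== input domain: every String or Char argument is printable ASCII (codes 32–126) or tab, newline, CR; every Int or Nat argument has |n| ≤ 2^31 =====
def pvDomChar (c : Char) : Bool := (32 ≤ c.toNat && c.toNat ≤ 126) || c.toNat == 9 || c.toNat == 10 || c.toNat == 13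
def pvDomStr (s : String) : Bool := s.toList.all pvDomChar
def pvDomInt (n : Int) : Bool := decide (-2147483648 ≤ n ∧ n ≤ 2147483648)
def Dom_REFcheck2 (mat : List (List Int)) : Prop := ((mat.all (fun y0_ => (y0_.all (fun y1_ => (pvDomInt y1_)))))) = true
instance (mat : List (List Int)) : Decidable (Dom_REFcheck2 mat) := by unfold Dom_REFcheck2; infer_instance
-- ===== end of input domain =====

-- B replaces A's stateful short-circuiting scan with a per-row zero table compared to its sorted form (simpler decomposition).


-- ===== PORT A =====
-- loop over rows carrying the zeroRowFound flag; row.all/any transcribe the inner early-exit scans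
def REFcheck2Loop (zeroRowFound : Bool) : List (List Int) → Bool
  | [] => true
  | i :: rest =>
    if zeroRowFound == false then
      let flag := i.all (fun j => !(j != 0))
      if flag == true then REFcheck2Loop true rest
      else REFcheck2Loop false rest
    else
      if i.any (fun j => j != 0) then false
      else REFcheck2Loop zeroRowFound rest

def REFcheck2 (mat : List (List Int)) : Bool := REFcheck2Loop false mat

-- ===== PORT B =====
def REFcheck2_alt (mat : List (List Int)) : Bool :=
  let zeros := mat.map (fun row => row.all (fun x => x == 0))
  zeros == PySem.List.sorted zeros (fun b => b) false

-- ===== PRECONDITION & SPEC =====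
def Spec_REFcheck2 (mat : List (List Int)) (out : Bool) : Prop := out = REFcheck2_alt mat
instance (mat : List (List Int)) (out : Bool) : Decidable (Spec_REFcheck2 mat out) := by unfold Spec_REFcheck2; infer_instance

-- ===== CLAIM (what is proved, stated in full; the proofs are below) =====
def Claim_equal_REFcheck2 : Prop := ∀ (mat : List (List Int)), Dom_REFcheck2 mat → Spec_REFcheck2 mat (REFcheck2 mat)

-- ===== LEMMAS AND PROOFS =====

-- after the first zero row, A just checks that every remaining row is all-zero
theorem loop_true_iff (mat : List (List Int)) :
    REFcheck2Loop true mat = true ↔ ∀ row ∈ mat, ∀ x ∈ row, x = 0 := by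
  induction mat with
  | nil => simp [REFcheck2Loop]
  | cons i rest ih =>
    by_cases h : i.any (fun j => j != 0)
    · have hstep : REFcheck2Loop true (i :: rest) = false := by
        simp only [REFcheck2Loop]
        rw [if_neg (by simp), if_pos h]
      rw [hstep]
      simp only [List.any_eq_true, bne_iff_ne, ne_eq] at h
      obtain ⟨x, hx, hx0⟩ := h
      simp only [Bool.false_eq_true, false_iff]
      intro hc
      exact hx0 (hc i (by simp) x hx)
    · have hstep : REFcheck2Loop true (i :: rest) = REFcheck2Loop true rest := by
        simp only [REFcheck2Loop]
        rw [if_neg (by simp), if_neg h]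
      rw [hstep, ih]
      simp only [List.any_eq_true, bne_iff_ne, ne_eq] at h
      push_neg at h
      constructor
      · intro hr row hrow
        rcases List.mem_cons.mp hrow with rfl | hrow
        · exact h
        · exact hr row hrow
      · intro hr row hrow; exact hr row (List.mem_cons_of_mem _ hrow)

-- monotone boolean table characterisation helpers
theorem pairwise_cons_true (t : List Bool) :
    (true :: t).Pairwise (· ≤ ·) ↔ ∀ b ∈ t, b = true := by
  rw [List.pairwise_cons]
  constructor
  · intro ⟨h1, _⟩ b hb
    have := h1 b hb
    cases b
    · exact absurd this (by decide)
    · rfl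
  · intro h
    refine ⟨fun b hb => by rw [h b hb], ?_⟩
    induction t with
    | nil => exact List.Pairwise.nil
    | cons b t iht =>
      rw [List.pairwise_cons]
      refine ⟨fun c hc => ?_, iht (fun c hc => h c (List.mem_cons_of_mem _ hc))⟩
      rw [h c (List.mem_cons_of_mem _ hc)]
      exact Bool.le_true b

theorem pairwise_cons_false (t : List Bool) :
    (false :: t).Pairwise (· ≤ ·) ↔ t.Pairwise (· ≤ ·) := by
  rw [List.pairwise_cons]
  constructor
  · exact fun ⟨_, h⟩ => h
  · intro h
    exact ⟨fun b _ => Bool.false_le b, h⟩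

-- A's loop accepts iff the per-row zero table is monotone
theorem loop_false_iff (mat : List (List Int)) :
    REFcheck2Loop false mat = true
      ↔ (mat.map (fun row => row.all (fun x => x == 0))).Pairwise (· ≤ ·) := by
  induction mat with
  | nil => simp [REFcheck2Loop]
  | cons i rest ih =>
    simp only [List.map_cons]
    by_cases h : i.all (fun x => x == 0)
    · have hflag : (i.all (fun j => !(j != 0))) = true := by simpa using h
      have hstep : REFcheck2Loop false (i :: rest) = REFcheck2Loop true rest := by
        simp [REFcheck2Loop, hflag]
      rw [hstep, h, loop_true_iff, pairwise_cons_true]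
      constructor
      · intro hz b hb
        obtain ⟨row, hrow, rfl⟩ := List.mem_map.mp hb
        simp only [List.all_eq_true, beq_iff_eq]
        exact hz row hrow
      · intro hz row hrow x hx
        have := hz _ (List.mem_map.mpr ⟨row, hrow, rfl⟩)
        simp only [List.all_eq_true, beq_iff_eq] at this
        exact this x hx
    · have hflag : (i.all (fun j => !(j != 0))) = false := by
        cases hb : i.all (fun j => !(j != 0))
        · rfl
        · exact absurd (by simpa using hb) h
      have hstep : REFcheck2Loop false (i :: rest) = REFcheck2Loop false rest := by
        simp [REFcheck2Loop, hflag]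
      rw [hstep, Bool.eq_false_iff.mpr h, pairwise_cons_false]
      exact ih

-- B's equality-with-sorted test equals the same monotonicity condition
theorem alt_iff (zeros : List Bool) :
    (zeros == PySem.List.sorted zeros (fun b => b) false) = true
      ↔ zeros.Pairwise (· ≤ ·) := by
  constructor
  · intro h
    have hs := PySem.List.sorted_pairwise zeros (fun b => b)
    rw [← beq_iff_eq.mp h] at hs
    simpa using hs
  · intro h
    rw [PySem.List.sorted_eq_self_of_pairwise _ _ (by simpa using h)]
    simp

theorem ab_eq (mat : List (List Int)) : REFcheck2 mat = REFcheck2_alt mat := by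
  unfold REFcheck2 REFcheck2_alt
  rw [Bool.eq_iff_iff, loop_false_iff, alt_iff]

-- ===== VERDICT (by name: the statement is the Claim_ definition above) =====
theorem REFcheck2_spec : Claim_equal_REFcheck2 := by
  intro mat _
  unfold Spec_REFcheck2
  exact ab_eq mat
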